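-- pv_equiv track=rewrite | github.com/tushar-mamidwar/InfyTQ | Data Structures and Algorithms using Python part-2/Assignment set - 5/Assignment-2.py | return_substr_based_on_colons
-- ===== SOURCE A (Python) =====
-- def return_substr_based_on_colons(string, no_of_colons):
--     colon_count = 0
--     sub_str = ""
--     for character in string:
--         if character == ":":
--             colon_count += 1
--         elif colon_count == no_of_colons:
--             sub_str += character
--     return sub_str
-- ===== SOURCE B (Python) =====
-- def return_substr_based_on_colons(string, no_of_colons):
--     parts = string.split(":")
--     if 0 <= no_of_colons < len(parts):
--         return parts[no_of_colons]
--     return ""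
-- ===== Notes on version B (the rewrite author's own statement) =====
-- stated objective: simpler
-- what changed: Replaces the character-by-character scan with a running colon counter and accumulator by a single split(':') followed by a guarded index into the resulting segment list.
import Mathlib
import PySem

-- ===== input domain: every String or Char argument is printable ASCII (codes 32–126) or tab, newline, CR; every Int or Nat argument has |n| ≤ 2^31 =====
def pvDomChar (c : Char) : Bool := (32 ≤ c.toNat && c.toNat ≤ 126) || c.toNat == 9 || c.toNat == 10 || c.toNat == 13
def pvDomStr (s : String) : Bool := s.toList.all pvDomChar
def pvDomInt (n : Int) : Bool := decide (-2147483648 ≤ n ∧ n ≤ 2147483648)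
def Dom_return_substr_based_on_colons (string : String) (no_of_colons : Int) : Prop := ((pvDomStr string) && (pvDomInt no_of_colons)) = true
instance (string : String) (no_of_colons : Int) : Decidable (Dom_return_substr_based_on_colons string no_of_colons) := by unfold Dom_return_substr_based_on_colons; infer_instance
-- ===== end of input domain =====

-- B replaces A's single scan with a running colon counter and character accumulator
-- by split-on-':' followed by a guarded index into the segment list (objective: simpler).


-- ===== PORT A =====
-- for character in string: if ':' bump the counter, elif counter == no_of_colons append
def return_substr_based_on_colons (string : String) (no_of_colons : Int) : String :=
  String.ofList
    (string.toList.foldl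
      (fun (st : Int × List Char) character =>
        if character == ':' then (st.1 + 1, st.2)
        else if st.1 == no_of_colons then (st.1, st.2 ++ [character])
        else st)
      (0, [])).2

-- ===== PORT B =====
-- parts = string.split(':'); guarded index, else ''
def return_substr_based_on_colons_alt (string : String) (no_of_colons : Int) : String :=
  if 0 ≤ no_of_colons ∧ no_of_colons < ((string.toList.splitOn ':').length : Int) then
    String.ofList (((string.toList.splitOn ':')[no_of_colons.toNat]?).getD [])
  else ""

-- ===== PRECONDITION & SPEC =====
def Spec_return_substr_based_on_colons (string : String) (no_of_colons : Int) (out : String) : Prop := out = return_substr_based_on_colons_alt string no_of_colons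
instance (string : String) (no_of_colons : Int) (out : String) : Decidable (Spec_return_substr_based_on_colons string no_of_colons out) := by unfold Spec_return_substr_based_on_colons; infer_instance

-- ===== CLAIM (what is proved, stated in full; the proofs are below) =====
def Claim_equal_return_substr_based_on_colons : Prop := ∀ (string : String) (no_of_colons : Int), Dom_return_substr_based_on_colons string no_of_colons → Spec_return_substr_based_on_colons string no_of_colons (return_substr_based_on_colons string no_of_colons)

-- ===== LEMMAS AND PROOFS =====

/-- The guarded indexing B performs, on a list of parts. -/
def pvPick (parts : List (List Char)) (k : Int) : List Char :=
  if 0 ≤ k ∧ k < (parts.length : Int) then (parts[k.toNat]?).getD [] else []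

lemma pvPick_neg (parts : List (List Char)) (k : Int) (h : k < 0) :
    pvPick parts k = [] := by
  simp only [pvPick, ite_eq_right_iff, and_imp]
  intro h'
  omega

lemma pvPick_nil_cons (parts : List (List Char)) (k : Int) :
    pvPick ([] :: parts) k = pvPick parts (k - 1) := by
  have hlen : ((([] : List Char) :: parts).length : Int) = (parts.length : Int) + 1 := by
    simp only [List.length_cons]
    push_cast
    ring
  rcases lt_trichotomy k 0 with h | h | h
  · rw [pvPick_neg ([] :: parts) k h, pvPick_neg parts (k - 1) (by omega)]
  · subst h
    rw [pvPick_neg parts (0 - 1) (by omega)]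
    unfold pvPick
    rw [if_pos (show (0:Int) ≤ 0 ∧ (0:Int) < ((([] : List Char) :: parts).length : Int) by omega)]
    simp
  · unfold pvPick
    have hk : k.toNat = (k - 1).toNat + 1 := by omega
    by_cases hc : 0 ≤ k - 1 ∧ k - 1 < (parts.length : Int)
    · rw [if_pos (by omega), if_pos hc, hk, List.getElem?_cons_succ]
    · rw [if_neg (by omega), if_neg hc]

lemma pvPick_modifyHead (c : Char) (parts : List (List Char)) (hne : parts ≠ []) (k : Int) :
    pvPick (parts.modifyHead (c :: ·)) k =
      if k = 0 then c :: pvPick parts 0 else pvPick parts k := by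
  obtain ⟨p, ps, rfl⟩ := List.exists_cons_of_ne_nil hne
  by_cases h0 : k = 0
  · subst h0
    simp [pvPick]
  · rcases lt_trichotomy k 0 with h | h | h
    · rw [if_neg h0, pvPick_neg _ _ h, pvPick_neg _ _ h]
    · exact absurd h h0
    · obtain ⟨m, hm⟩ : ∃ m, k.toNat = m + 1 := ⟨k.toNat - 1, by omega⟩
      rw [if_neg h0]
      unfold pvPick
      simp only [List.modifyHead_cons, List.length_cons, hm, List.getElem?_cons_succ]

lemma splitOnP_ne_nil (p : Char → Bool) (cs : List Char) : cs.splitOnP p ≠ [] := by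
  induction cs with
  | nil => simp [List.splitOnP_nil]
  | cons c rest ih =>
    rw [List.splitOnP_cons]
    split_ifs
    · simp
    · intro h
      exact ih (List.modifyHead_eq_nil_iff.mp h)

/-- Loop invariant: A's fold from state `(cc, acc)` ends with `acc` followed by the
segment of index `n - cc` of the split of the remaining characters. -/
lemma pvLoop_eq (n : Int) (cs : List Char) : ∀ (cc : Int) (acc : List Char),
    (cs.foldl
      (fun (st : Int × List Char) character =>
        if character == ':' then (st.1 + 1, st.2)
        else if st.1 == n then (st.1, st.2 ++ [character])
        else st)
      (cc, acc)).2 = acc ++ pvPick (cs.splitOnP (· == ':')) (n - cc) := by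
  induction cs with
  | nil =>
    intro cc acc
    rw [List.foldl_nil, List.splitOnP_nil]
    unfold pvPick
    have hl : ((([] : List Char) :: ([] : List (List Char))).length : Int) = 1 := by simp
    by_cases h : 0 ≤ n - cc ∧ n - cc < ((([] : List Char) :: ([] : List (List Char))).length : Int)
    · rw [if_pos h]
      have h0 : (n - cc).toNat = 0 := by omega
      rw [h0]
      simp
    · rw [if_neg h]
      simp
  | cons c rest ih =>
    intro cc acc
    by_cases hc : c = ':'
    · subst hc
      rw [List.foldl_cons, List.splitOnP_cons]
      simp only [beq_self_eq_true, ite_true]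
      rw [ih, pvPick_nil_cons]
      congr 2
      omega
    · have hc' : (c == ':') = false := by simp [hc]
      rw [List.foldl_cons, List.splitOnP_cons, hc']
      simp only [Bool.false_eq_true, ite_false]
      rw [pvPick_modifyHead c _ (splitOnP_ne_nil _ _)]
      by_cases he : cc = n
      · have he' : (cc == n) = true := by simp [he]
        rw [he']
        simp only [ite_true]
        rw [ih, if_pos (by omega)]
        have h0 : n - cc = 0 := by omega
        rw [h0]
        simp
      · have he' : (cc == n) = false := by simp [he]
        rw [he']
        simp only [Bool.false_eq_true, ite_false]
        rw [ih, if_neg (by omega)]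

-- ===== VERDICT (by name: the statement is the Claim_ definition above) =====
theorem return_substr_based_on_colons_spec : Claim_equal_return_substr_based_on_colons := by
  intro string n _
  show _ = _
  unfold return_substr_based_on_colons return_substr_based_on_colons_alt
  rw [pvLoop_eq n string.toList 0 [], List.nil_append,
    show n - 0 = n from by ring,
    show string.toList.splitOn ':' = string.toList.splitOnP (· == ':') from rfl]
  unfold pvPick
  split_ifs with h
  · rfl
  · rfl
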